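-- pv_equiv track=rewrite | github.com/conversationai/wikidetox | conversation_reconstruction/dataflow/conversation_reconstruction/construct_utils/utils/insert_utils.py | get_section_tokens
-- ===== SOURCE A (Python) =====
-- def get_section_tokens(tokens, line):
--     sofar = ""
--     for tok in tokens:
--         if line in sofar:
--             break
--         else:
--             yield tok
--             sofar += tok
-- ===== SOURCE B (Python) =====
-- def get_section_tokens(tokens, line):
--     # Find the first occurrence of `line` in the full concatenation once,
--     # then cut the token list at the first token whose preceding accumulated
--     # length already reaches the end of that occurrence.
--     toks = list(tokens)
--     pos = "".join(toks).find(line)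
--     if pos < 0:
--         cut = len(toks)
--     else:
--         end = pos + len(line)
--         cut = len(toks)
--         acc = 0
--         for i, tok in enumerate(toks):
--             if acc >= end:
--                 cut = i
--                 break
--             acc += len(tok)
--     yield from toks[:cut]
-- ===== Notes on version B (the rewrite author's own statement) =====
-- stated objective: faster
-- what changed: B eliminates A's per-token substring scan of the growing accumulation: it joins all tokens once, does a single find(line) on the joined string, and converts the occurrence's end offset to a token count via a prefix-sum scan of token lengths.
import Mathlib
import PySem

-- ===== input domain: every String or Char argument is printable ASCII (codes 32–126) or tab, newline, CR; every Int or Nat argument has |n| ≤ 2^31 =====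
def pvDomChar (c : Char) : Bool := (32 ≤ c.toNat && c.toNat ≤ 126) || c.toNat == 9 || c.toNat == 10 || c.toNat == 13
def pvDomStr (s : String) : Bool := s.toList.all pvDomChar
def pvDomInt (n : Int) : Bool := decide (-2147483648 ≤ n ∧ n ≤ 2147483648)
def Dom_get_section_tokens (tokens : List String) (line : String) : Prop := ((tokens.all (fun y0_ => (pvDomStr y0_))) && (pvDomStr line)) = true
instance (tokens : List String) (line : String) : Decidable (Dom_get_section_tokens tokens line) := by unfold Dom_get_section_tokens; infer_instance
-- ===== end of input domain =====

-- B replaces A's per-token 'line in sofar' rescans of the growing accumulation by ONE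
-- find(line) on the joined string plus a prefix-sum scan of token lengths giving the cut.
-- (A is a generator; both are compared as the list of yielded tokens.)

-- ===== PORT A =====
-- A: accumulate everything yielded into `sofar`, stop as soon as `line in sofar`.
def goA_get_section_tokens (line : String) (tokens : List String) (sofar : String) : List String :=
  match tokens with
  | [] => []
  | tok :: rest =>
    if PySem.Str.isIn line sofar then []
    else tok :: goA_get_section_tokens line rest (sofar ++ tok)

def get_section_tokens (tokens : List String) (line : String) : List String :=
  goA_get_section_tokens line tokens ""

-- ===== PORT B =====
-- B's loop: first index i whose preceding accumulated length `acc` already reaches `endp`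
-- (the loop counter i also serves as the no-break default, since i = len(toks) at the end).
def goCut_get_section_tokens (endp : Int) (toks : List String) (acc : Int) (i : Nat) : Nat :=
  match toks with
  | [] => i
  | tok :: rest =>
    if endp ≤ acc then i
    else goCut_get_section_tokens endp rest (acc + PySem.Str.len tok) (i + 1)

def get_section_tokens_alt (tokens : List String) (line : String) : List String :=
  let pos := PySem.Str.find (PySem.Str.join "" tokens) line
  let cut := if pos < 0 then tokens.length
    else goCut_get_section_tokens (pos + PySem.Str.len line) tokens 0 0
  tokens.take cut   -- toks[:cut] with cut a non-negative count

-- ===== PRECONDITION & SPEC =====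
def Spec_get_section_tokens (tokens : List String) (line : String) (out : List String) : Prop := out = get_section_tokens_alt tokens line
instance (tokens : List String) (line : String) (out : List String) : Decidable (Spec_get_section_tokens tokens line out) := by unfold Spec_get_section_tokens; infer_instance

-- ===== CLAIM (what is proved, stated in full; the proofs are below) =====
def Claim_equal_get_section_tokens : Prop := ∀ (tokens : List String) (line : String), Dom_get_section_tokens tokens line → Spec_get_section_tokens tokens line (get_section_tokens tokens line)

-- ===== LEMMAS AND PROOFS =====

-- join with the empty separator is flatten
lemma pv_join_nil_flatten (parts : List (List Char)) :
    PySem.Chars.join [] parts = parts.flatten := by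
  induction parts with
  | nil => simp [PySem.Chars.join_nil]
  | cons a rest ih =>
    cases rest with
    | nil => simp [PySem.Chars.join_singleton]
    | cons b r => rw [PySem.Chars.join_cons_cons, ih]; simp

-- if line occurs nowhere in the remaining whole string, A yields every token
lemma pv_A_all (line : String) (toks : List String) :
    ∀ sofar : String,
      ¬ line.toList <:+: (sofar.toList ++ (toks.map String.toList).flatten) →
      goA_get_section_tokens line toks sofar = toks := by
  induction toks with
  | nil => intro _ _; rfl
  | cons tok rest ih =>
    intro sofar h
    rw [goA_get_section_tokens]
    rw [if_neg, ih (sofar ++ tok) (by simpa [List.append_assoc] using h)]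
    intro hin
    exact h (((PySem.Str.isIn_iff_infix _ _).mp hin).trans
      (List.prefix_append _ _).isInfix)

-- characterisation: in any prefix s of F, line occurs iff s is long enough to
-- contain the FIRST occurrence of line in F (which ends at p + |L|)
lemma pv_char (L F s : List Char) (p : Nat) (hL : L ≠ [])
    (h1 : L <+: F.drop p) (h2 : ∀ i < p, ¬ L <+: F.drop i)
    (hs : s <+: F) :
    PySem.Chars.isIn L s = true ↔ p + L.length ≤ s.length := by
  have hsF : s = F.take s.length := by
    rw [List.prefix_iff_eq_take] at hs; exact hs
  constructor
  · intro h
    obtain ⟨j, hj⟩ := (PySem.Chars.exists_prefix_drop_iff_isIn _ _).mpr h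
    have hjs : j < s.length := by
      by_contra hge
      rw [List.drop_eq_nil_of_le (by omega)] at hj
      exact hL (List.prefix_nil.mp hj)
    have hdt : s.drop j = (F.drop j).take (s.length - j) := by
      conv_lhs => rw [hsF]
      rw [List.drop_take]
    have hLF : L <+: F.drop j := hj.trans (by rw [hdt]; exact List.take_prefix _ _)
    have hpj : p ≤ j := by
      by_contra hlt
      exact h2 j (by omega) hLF
    have hlen : L.length ≤ s.length - j := by
      have := hj.length_le
      simp [List.length_drop] at this
      omega
    omega
  · intro h
    rw [← PySem.Chars.exists_prefix_drop_iff_isIn _ _]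
    refine ⟨p, ?_⟩
    have hdt : s.drop p = (F.drop p).take (s.length - p) := by
      conv_lhs => rw [hsF]
      rw [List.drop_take]
    rw [hdt, List.prefix_take_iff]
    exact ⟨h1, by have := h1.length_le; omega⟩

-- the loop counter only shifts the result of B's cut loop
lemma pv_goCut_shift (endp : Int) (toks : List String) :
    ∀ acc i, goCut_get_section_tokens endp toks acc i
      = i + goCut_get_section_tokens endp toks acc 0 := by
  induction toks with
  | nil => intro acc i; simp [goCut_get_section_tokens]
  | cons tok rest ih =>
    intro acc i
    rw [goCut_get_section_tokens, goCut_get_section_tokens]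
    split_ifs
    · simp
    · rw [ih _ (i + 1), ih _ (0 + 1)]; omega

-- main invariant: A on the remaining tokens yields exactly the first `cut` of them,
-- where sofar is the consumed prefix of the whole string F and endp = p + |line|
lemma pv_main (line : String) (hL : line.toList ≠ []) (F : List Char) (p : Nat)
    (h1 : line.toList <+: F.drop p) (h2 : ∀ i < p, ¬ line.toList <+: F.drop i) :
    ∀ (toks : List String) (sofar : String),
      sofar.toList ++ (toks.map String.toList).flatten = F →
      goA_get_section_tokens line toks sofar
        = toks.take (goCut_get_section_tokens ((p : Int) + PySem.Str.len line) toks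
            (sofar.toList.length : Int) 0) := by
  intro toks
  induction toks with
  | nil => intro sofar _; rfl
  | cons tok rest ih =>
    intro sofar hcat
    have hpre : sofar.toList <+: F := ⟨_, hcat⟩
    have hiff := pv_char line.toList F sofar.toList p hL h1 h2 hpre
    have hstr : PySem.Str.isIn line sofar = true ↔ p + line.toList.length ≤ sofar.toList.length :=
      (PySem.Str.isIn_iff_infix _ _).trans
        (((PySem.Chars.isIn_iff_infix _ _).symm).trans hiff)
    have hclen : PySem.Str.len line = (line.toList.length : Int) := by simp [pysem]
    rw [goA_get_section_tokens, goCut_get_section_tokens]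
    by_cases hc : ((p : Int) + PySem.Str.len line ≤ (sofar.toList.length : Int))
    · rw [if_pos hc, if_pos (hstr.mpr (by rw [hclen] at hc; omega))]
      simp
    · rw [if_neg hc, if_neg (by
        intro hin
        exact hc (by rw [hclen]; have := hstr.mp hin; omega))]
      rw [pv_goCut_shift, ih (sofar ++ tok) (by simpa [List.append_assoc] using hcat)]
      have hacc : (sofar.toList.length : Int) + PySem.Str.len tok
          = (((sofar ++ tok).toList.length : Nat) : Int) := by
        simp [pysem]
      rw [hacc, Nat.add_comm 1, List.take_succ_cons]

-- ===== VERDICT (by name: the statement is the Claim_ definition above) =====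
theorem get_section_tokens_spec : Claim_equal_get_section_tokens := by
  intro tokens line _dom
  unfold Spec_get_section_tokens get_section_tokens get_section_tokens_alt
  show goA_get_section_tokens line tokens ""
      = List.take (if PySem.Str.find (PySem.Str.join "" tokens) line < 0 then tokens.length
          else goCut_get_section_tokens
            (PySem.Str.find (PySem.Str.join "" tokens) line + PySem.Str.len line) tokens 0 0) tokens
  have hF : PySem.Chars.join ("" : String).toList (tokens.map String.toList)
      = (tokens.map String.toList).flatten := by
    rw [show ("" : String).toList = [] from rfl]
    exact pv_join_nil_flatten (tokens.map String.toList)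
  have hfc : PySem.Str.find (PySem.Str.join "" tokens) line
      = PySem.Chars.find (tokens.map String.toList).flatten line.toList := by
    simp only [pysem]
    rw [hF]
  by_cases hpos : PySem.Str.find (PySem.Str.join "" tokens) line < 0
  · -- no occurrence anywhere: A yields everything, B takes everything
    rw [if_pos hpos]
    have hno : ¬ line.toList <:+: (tokens.map String.toList).flatten := by
      rw [← PySem.Chars.find_eq_neg_one_iff, ← hfc]
      have hlow : -1 ≤ PySem.Str.find (PySem.Str.join "" tokens) line := by
        simp only [pysem]
      omega
    rw [pv_A_all line tokens "" (by simpa using hno), List.take_length]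
  · rw [if_neg hpos]
    rw [Int.not_lt] at hpos
    set f := PySem.Str.find (PySem.Str.join "" tokens) line with hf
    have hspec := PySem.Chars.find_spec (s := (tokens.map String.toList).flatten)
      (sub := line.toList) (by rw [← hfc]; exact hpos)
    rw [← hfc] at hspec
    by_cases hL : line.toList = []
    · -- line = "": find = 0, endp = 0, A stops immediately and B cuts at 0
      have hline : line = "" := String.toList_eq_nil_iff.mp hL
      subst hline
      cases tokens with
      | nil => rfl
      | cons tok rest =>
        rw [goA_get_section_tokens,
          if_pos (by simp [pysem, PySem.Chars.isIn_nil]), goCut_get_section_tokens,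
          if_pos (by
            have : f = 0 := by rw [hfc, hL]; simp [PySem.Chars.find_nil]
            simp [this, pysem])]
        simp
    · -- general case: the main invariant starting from sofar = ""
      have hmain := pv_main line hL (tokens.map String.toList).flatten f.toNat
        (hspec.1) (hspec.2) tokens "" (by simp)
      rw [Int.toNat_of_nonneg hpos] at hmain
      simpa using hmain
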